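-- pv_equiv track=rewrite | github.com/CleverCatGames/nes-platformer-template | tools/util/level.py | convert_objects
-- ===== SOURCE A (Python) =====
-- PAGE_HORIZ_TILES = 16
--
-- def convert_objects(objects):
--     # sort horizontally
--     def sort_horiz(o):
--         p, x, _, _, _ = o
--         return p * PAGE_HORIZ_TILES + x
--     last_page = 0
--     num_bytes = 0
--     final = []
--     for (page, x, y, gid, flags) in sorted(objects, key=sort_horiz):
--         if page - last_page > 1:
--             raise Exception("Object page %s is empty!" % (last_page+1))
--         out = ['OBJ_POS({0:2}, {1:2})'.format(x, y)]
--         tile = ['{0:3}'.format(gid)]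
--         if page > last_page:
--             tile.append('OBJ_NEW_PAGE')
--         if flags:
--             tile.append('OBJ_EXTRA_DATA')
--             out.append('|'.join(flags))
--         out.insert(1, '|'.join(tile))
--         final.append(', '.join(out) + ',')
--         num_bytes += len(out)
--         last_page = page
--     # add final byte for the object end byte
--     return num_bytes+1, final
-- ===== SOURCE B (Python) =====
-- PAGE_HORIZ_TILES = 16
--
-- def _fmt_object(prev, o):
--     page, x, y, gid, flags = o
--     tile = '{0:3}'.format(gid)
--     if page > prev:
--         tile += '|OBJ_NEW_PAGE'
--     if flags:
--         tile += '|OBJ_EXTRA_DATA'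
--     line = 'OBJ_POS({0:2}, {1:2}), {2}'.format(x, y, tile)
--     if flags:
--         line += ', ' + '|'.join(flags)
--     return line + ','
--
-- def convert_objects(objects):
--     ordered = sorted(objects, key=lambda o: o[0] * PAGE_HORIZ_TILES + o[1])
--     prev_pages = [0] + [o[0] for o in ordered[:-1]]
--     for prev, o in zip(prev_pages, ordered):
--         if o[0] - prev > 1:
--             raise Exception("Object page %s is empty!" % (prev + 1))
--     final = [_fmt_object(prev, o) for prev, o in zip(prev_pages, ordered)]
--     num_bytes = sum(3 if o[4] else 2 for o in ordered) + 1
--     return num_bytes, final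
-- ===== Notes on version B (the rewrite author's own statement) =====
-- stated objective: alternative
-- what changed: Replaces A's single stateful loop (last_page/num_bytes/final accumulators, building each line by list-insert and ', '.join) with a stateless comprehension over each sorted object zipped with its predecessor's page, direct string concatenation per line, and a separate sum for the byte count.
import Mathlib
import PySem

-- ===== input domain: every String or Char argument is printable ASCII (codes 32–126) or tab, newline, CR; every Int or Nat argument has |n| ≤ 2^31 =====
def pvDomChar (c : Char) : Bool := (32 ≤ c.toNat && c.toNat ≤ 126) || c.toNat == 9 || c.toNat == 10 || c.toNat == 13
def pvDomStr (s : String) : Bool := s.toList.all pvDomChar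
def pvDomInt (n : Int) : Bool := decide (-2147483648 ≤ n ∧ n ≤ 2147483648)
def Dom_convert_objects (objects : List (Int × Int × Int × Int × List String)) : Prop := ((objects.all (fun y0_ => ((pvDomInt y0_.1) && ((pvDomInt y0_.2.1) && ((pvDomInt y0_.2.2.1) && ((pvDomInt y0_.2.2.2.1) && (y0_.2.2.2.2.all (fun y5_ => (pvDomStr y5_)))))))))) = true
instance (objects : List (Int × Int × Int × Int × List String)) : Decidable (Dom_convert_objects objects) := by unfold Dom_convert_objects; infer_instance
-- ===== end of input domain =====

-- B replaces A's single stateful loop (last_page/num_bytes/final accumulators, list-insert and join)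
-- by a stateless map over each object zipped with its predecessor's page plus a separate sum; objective: alternative decomposition.

-- ===== PORT A =====
-- '{0:w}'.format(n) for an int: str(n) right-aligned to width w with spaces (exact).
def pvFmt (w : Nat) (n : Int) : String :=
  let cs := PySem.Int.toChars n
  String.ofList (List.replicate (w - cs.length) ' ' ++ cs)

-- the body of A's for-loop (the raise branch is excluded by Pre_convert_objects; the state is (last_page, num_bytes, final))
def pvStepA (st : Int × Int × List String) (o : Int × Int × Int × Int × List String) :
    Int × Int × List String :=
  let page := o.1; let x := o.2.1; let y := o.2.2.1; let gid := o.2.2.2.1; let flags := o.2.2.2.2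
  let last_page := st.1
  let out : List String := ["OBJ_POS(" ++ pvFmt 2 x ++ ", " ++ pvFmt 2 y ++ ")"]
  let tile : List String := [pvFmt 3 gid]
  let tile := if page > last_page then tile ++ ["OBJ_NEW_PAGE"] else tile
  let tile := if flags ≠ [] then tile ++ ["OBJ_EXTRA_DATA"] else tile
  let out := if flags ≠ [] then out ++ [PySem.Str.join "|" flags] else out
  let out := PySem.List.insert out 1 (PySem.Str.join "|" tile)
  (page, st.2.1 + PySem.List.len out, st.2.2 ++ [PySem.Str.join ", " out ++ ","])

def convert_objects (objects : List (Int × Int × Int × Int × List String)) : Int × List String :=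
  let r := (PySem.List.sorted objects (fun o => o.1 * 16 + o.2.1)).foldl pvStepA (0, 0, [])
  (r.2.1 + 1, r.2.2)

-- ===== PORT B =====
def pvFmtObject (prev : Int) (o : Int × Int × Int × Int × List String) : String :=
  let tile := pvFmt 3 o.2.2.2.1
  let tile := if o.1 > prev then tile ++ "|OBJ_NEW_PAGE" else tile
  let tile := if o.2.2.2.2 ≠ [] then tile ++ "|OBJ_EXTRA_DATA" else tile
  let line := "OBJ_POS(" ++ pvFmt 2 o.2.1 ++ ", " ++ pvFmt 2 o.2.2.1 ++ "), " ++ tile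
  let line := if o.2.2.2.2 ≠ [] then line ++ ", " ++ PySem.Str.join "|" o.2.2.2.2 else line
  line ++ ","

def convert_objects_alt (objects : List (Int × Int × Int × Int × List String)) : Int × List String :=
  let ordered := PySem.List.sorted objects (fun o => o.1 * 16 + o.2.1)
  let prev_pages : List Int := 0 :: (PySem.List.slice ordered none (some (-1))).map (·.1)
  let final := (prev_pages.zip ordered).map (fun po => pvFmtObject po.1 po.2)
  let num_bytes := (ordered.map (fun o => if o.2.2.2.2 ≠ [] then (3 : Int) else 2)).sum + 1
  (num_bytes, final)

-- ===== PRECONDITION & SPEC =====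
-- Pre_ excludes exactly the inputs on which Python A raises "Object page … is empty!":
-- those where, scanning the key-sorted list starting from page 0, some object's page exceeds its predecessor's by more than 1.
def Pre_convert_objects (objects : List (Int × Int × Int × Int × List String)) : Prop :=
  let pages := (PySem.List.sorted objects (fun o => o.1 * 16 + o.2.1)).map (·.1)
  ∀ i : Nat, i < pages.length →
    pages.getD i 0 - (if i = 0 then 0 else pages.getD (i - 1) 0) ≤ 1
instance (objects : List (Int × Int × Int × Int × List String)) : Decidable (Pre_convert_objects objects) := by unfold Pre_convert_objects; infer_instance

def pvWitness_convert_objects : (List (Int × Int × Int × Int × List String)) :=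
  [(0, 3, 2, 7, []), (1, 1, 4, 9, ["OBJ_FLIP"])]

def Spec_convert_objects (objects : List (Int × Int × Int × Int × List String)) (out : Int × List String) : Prop := out = convert_objects_alt objects
instance (objects : List (Int × Int × Int × Int × List String)) (out : Int × List String) : Decidable (Spec_convert_objects objects out) := by unfold Spec_convert_objects; infer_instance

-- ===== CLAIM (what is proved, stated in full; the proofs are below) =====
def Claim_equal_convert_objects : Prop := ∀ (objects : List (Int × Int × Int × Int × List String)), Dom_convert_objects objects → Pre_convert_objects objects → Spec_convert_objects objects (convert_objects objects)

-- ===== LEMMAS AND PROOFS =====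

-- B's line list, written as structural recursion threading the previous page.
def pvBLines (lp : Int) : List (Int × Int × Int × Int × List String) → List String
  | [] => []
  | o :: t => pvFmtObject lp o :: pvBLines o.1 t

theorem pvJoin2 (sep a b : String) :
    PySem.Str.join sep [a, b] = a ++ sep ++ b := by
  apply String.toList_injective
  simp [PySem.Str.toList_join, PySem.Chars.join, List.intercalate]

theorem pvJoin3 (sep a b c : String) :
    PySem.Str.join sep [a, b, c] = a ++ sep ++ b ++ sep ++ c := by
  apply String.toList_injective
  simp [PySem.Str.toList_join, PySem.Chars.join, List.intercalate]

theorem pvJoin1 (sep a : String) : PySem.Str.join sep [a] = a := by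
  apply String.toList_injective
  simp [PySem.Str.toList_join, PySem.Chars.join, List.intercalate]

theorem pvInsert1_one (a v : String) : PySem.List.insert [a] 1 v = [a, v] := by
  rw [PySem.List.insert_ofNat _ 1 _ (by simp)]; rfl

theorem pvInsert1_two (a b v : String) : PySem.List.insert [a, b] 1 v = [a, v, b] := by
  rw [PySem.List.insert_ofNat _ 1 _ (by simp)]; rfl

-- each A-loop line equals B's per-object format, and len out = 3/2 as flags is nonempty/empty
theorem pvStepA_eq (st : Int × Int × List String) (o : Int × Int × Int × Int × List String) :
    pvStepA st o =
      (o.1, st.2.1 + (if o.2.2.2.2 ≠ [] then (3 : Int) else 2),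
        st.2.2 ++ [pvFmtObject st.1 o]) := by
  obtain ⟨page, x, y, gid, flags⟩ := o
  by_cases hf : flags = [] <;> by_cases hp : page > st.1 <;>
    simp [pvStepA, pvFmtObject, hf, hp, pvInsert1_one, pvInsert1_two,
      PySem.List.len, pvJoin1, pvJoin2, pvJoin3, String.append_assoc]

theorem pvFoldA (s : List (Int × Int × Int × Int × List String)) :
    ∀ (lp nb : Int) (acc : List String),
      (s.foldl pvStepA (lp, nb, acc)).2 =
        (nb + (s.map (fun o => if o.2.2.2.2 ≠ [] then (3 : Int) else 2)).sum,
         acc ++ pvBLines lp s) := by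
  induction s with
  | nil => intro lp nb acc; simp [pvBLines]
  | cons o t ih =>
    intro lp nb acc
    simp only [List.foldl_cons, pvStepA_eq, pvBLines, List.map_cons, List.sum_cons]
    rw [ih]
    simp [add_assoc]

-- B's zip-with-previous form equals the recursion pvBLines
theorem pvZip_eq_bLines (s : List (Int × Int × Int × Int × List String)) :
    ∀ lp : Int,
      ((lp :: (s.dropLast.map (·.1))).zip s).map (fun po => pvFmtObject po.1 po.2) =
        pvBLines lp s := by
  induction s with
  | nil => intro lp; simp [pvBLines]
  | cons o t ih =>
    intro lp
    cases t with
    | nil => simp [pvBLines]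
    | cons o2 t2 =>
      have h := ih o.1
      simp only [List.dropLast_cons₂, List.map_cons, List.zip_cons_cons, pvBLines] at h ⊢
      rw [h]

-- ===== VERDICT (by name: the statement is the Claim_ definition above) =====
theorem convert_objects_spec : Claim_equal_convert_objects := by
  intro objects _ _
  unfold Spec_convert_objects convert_objects convert_objects_alt
  simp only [PySem.List.slice_to_neg_one]
  rw [pvZip_eq_bLines, pvFoldA]
  simp
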